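-- pv_equiv track=rewrite | github.com/magneticB/morningstar | gspread_adaptor.py | get_col_to_a1
-- ===== SOURCE A (Python) =====
-- import string
--
-- def get_col_to_a1(header):
--     cols = []
--     for x in range(0,51):  # supports 52 columns max
--         if x < 26:
--             cols.append(string.ascii_uppercase[x])
--         else:
--             cols.append('A' + string.ascii_uppercase[x % 26])
--
--     return dict(zip(header, cols))
-- ===== SOURCE B (Python) =====
-- def get_col_to_a1(header):
--     # One pass over header[:51]; each label is computed by the general
--     # bijective-base-26 (Excel column name) divmod algorithm instead of a
--     # precomputed table: label(i+1) for i = 0..50 gives 'A'..'Z','AA'..'AY',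
--     # exactly the 51 labels A zips against.
--     result = {}
--     for i, name in enumerate(header[:51]):
--         n = i + 1
--         label = ''
--         while n:
--             n, r = divmod(n - 1, 26)
--             label = chr(65 + r) + label
--         result[name] = label
--     return result
-- ===== Notes on version B (the rewrite author's own statement) =====
-- stated objective: alternative
-- what changed: B drops A's precomputed 51-label table and zip: it makes one pass over header[:51] and computes each label by the general bijective-base-26 (Excel column) divmod algorithm, assigning into the dict directly.
import Mathlib
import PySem

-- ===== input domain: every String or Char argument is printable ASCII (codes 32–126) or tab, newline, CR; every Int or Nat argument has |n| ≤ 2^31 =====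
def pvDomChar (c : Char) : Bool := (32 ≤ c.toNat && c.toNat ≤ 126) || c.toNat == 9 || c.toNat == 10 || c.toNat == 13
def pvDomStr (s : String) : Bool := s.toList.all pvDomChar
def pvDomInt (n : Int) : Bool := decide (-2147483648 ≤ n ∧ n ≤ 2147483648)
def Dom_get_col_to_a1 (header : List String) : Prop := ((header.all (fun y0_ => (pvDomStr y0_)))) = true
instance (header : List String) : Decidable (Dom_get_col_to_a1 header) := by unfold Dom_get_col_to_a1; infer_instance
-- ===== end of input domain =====

-- B replaces A's precomputed 51-label table + zip + dict(...) by one pass over header[:51]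
-- computing each label with the general bijective-base-26 (Excel column) divmod algorithm.


-- ===== PORT A =====
-- string.ascii_uppercase as a list of characters
def pvAsciiUppercase : List Char :=
  ['A','B','C','D','E','F','G','H','I','J','K','L','M',
   'N','O','P','Q','R','S','T','U','V','W','X','Y','Z']

-- literal port of A: build the 51-element cols table over range(0,51), then dict(zip(header, cols))
def get_col_to_a1 (header : List String) : List (String × String) :=
  let cols : List String :=
    (PySem.List.pyRange 0 51 1).foldl (fun cols x =>
      if x < 26 then
        cols ++ [String.ofList [(PySem.List.pyGet? pvAsciiUppercase x).getD ' ']]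
      else
        cols ++ [String.ofList ['A', (PySem.List.pyGet? pvAsciiUppercase (PySem.Int.mod x 26)).getD ' ']]) []
  (PySem.Dict.ofList (header.zip cols)).items

-- ===== PORT B =====
-- B's while-loop: while n: n, r = divmod(n-1, 26); label = chr(65+r) + label
-- (n = i+1 with 0 ≤ i, so the Python int is a Nat here; divmod on Nats is /, %)
-- structural on a fuel argument (fuel = initial n bounds the iteration count,
-- since (n-1)/26 < n: the fuel branch is never the one that stops the loop)
def pvExcelGo : Nat → Nat → List Char → List Char
  | _, 0, acc => acc
  | 0, _ + 1, acc => acc   -- unreachable when fuel ≥ n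
  | fuel + 1, m + 1, acc => pvExcelGo fuel (m / 26) (Char.ofNat (65 + m % 26) :: acc)

-- B's for-loop: for i, name in enumerate(header[:51]): result[name] = label(i+1)
def pvBLoop : List String → Nat → PySem.Dict String String → PySem.Dict String String
  | [], _, d => d
  | name :: rest, i, d => pvBLoop rest (i + 1) (d.insert name (String.ofList (pvExcelGo (i + 1) (i + 1) [])))

def get_col_to_a1_alt (header : List String) : List (String × String) :=
  (pvBLoop (PySem.List.slice header none (some 51)) 0 PySem.Dict.empty).items

-- ===== PRECONDITION & SPEC =====
def Spec_get_col_to_a1 (header : List String) (out : List (String × String)) : Prop := out = get_col_to_a1_alt header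
instance (header : List String) (out : List (String × String)) : Decidable (Spec_get_col_to_a1 header out) := by unfold Spec_get_col_to_a1; infer_instance

-- ===== CLAIM =====
def Claim_equal_get_col_to_a1 : Prop := ∀ (header : List String), Dom_get_col_to_a1 header → Spec_get_col_to_a1 header (get_col_to_a1 header)

-- ===== LEMMAS AND PROOFS =====

-- A's label for index i (the table entry)
def pvLab (i : Nat) : String :=
  if i < 26 then String.ofList [pvAsciiUppercase.getD i ' ']
  else String.ofList ['A', pvAsciiUppercase.getD (i % 26) ' ']

-- A's cols table is exactly the first 51 labels
def pvCols : List String := (List.range 51).map pvLab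

lemma pvColsA_eq :
    ((PySem.List.pyRange 0 51 1).foldl (fun cols x =>
      if x < 26 then
        cols ++ [String.ofList [(PySem.List.pyGet? pvAsciiUppercase x).getD ' ']]
      else
        cols ++ [String.ofList ['A', (PySem.List.pyGet? pvAsciiUppercase (PySem.Int.mod x 26)).getD ' ']]) [])
    = pvCols := by decide

-- A's table entry for index i, as characters
def pvLabChars (i : Nat) : List Char :=
  if i < 26 then [pvAsciiUppercase.getD i ' ']
  else ['A', pvAsciiUppercase.getD (i % 26) ' ']

-- B's divmod label agrees with A's table entry for every index below 51
lemma pvLab_eq : ∀ i < 51, pvExcelGo (i + 1) (i + 1) [] = pvLabChars i := by decide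

lemma pvLab_chars (i : Nat) : pvLab i = String.ofList (pvLabChars i) := by
  unfold pvLab pvLabChars; split_ifs <;> rfl

lemma pvCols_length : pvCols.length = 51 := by decide

lemma pvBLoop_eq (rest : List String) :
    ∀ (i : Nat) (d : PySem.Dict String String), i + rest.length ≤ 51 →
      pvBLoop rest i d
        = (rest.zip (pvCols.drop i)).foldl (fun d p => d.insert p.1 p.2) d := by
  induction rest with
  | nil => intro i d _; simp [pvBLoop]
  | cons name rest ih =>
    intro i d hi
    have hlt : i < 51 := by simp at hi; omega
    have hlen : i < pvCols.length := by rw [pvCols_length]; exact hlt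
    have hd : pvCols.drop i = pvCols[i] :: pvCols.drop (i + 1) :=
      List.drop_eq_getElem_cons hlen
    have hget : pvCols[i] = String.ofList (pvExcelGo (i + 1) (i + 1) []) := by
      rw [pvLab_eq i hlt, ← pvLab_chars]
      simp [pvCols]
    rw [pvBLoop, ih (i + 1) _ (by simp at hi ⊢; omega), hd, hget]
    simp [List.zip_cons_cons]

-- zip truncates: zipping against a 51-element list sees only the first 51 headers
lemma zip_take (xs ys : List String) : (xs.take ys.length).zip ys = xs.zip ys := by
  induction xs generalizing ys with
  | nil => simp
  | cons x xs ih =>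
    cases ys with
    | nil => simp
    | cons y ys => simp [List.zip_cons_cons, ih]

-- ===== VERDICT =====
theorem get_col_to_a1_spec : Claim_equal_get_col_to_a1 := by
  intro header _
  unfold Spec_get_col_to_a1 get_col_to_a1 get_col_to_a1_alt
  rw [pvColsA_eq]
  have hsl : PySem.List.slice header none (some 51) = header.take 51 := by
    rw [PySem.List.slice_to]
    · rfl
    · norm_num
  rw [hsl,
    pvBLoop_eq (header.take 51) 0 PySem.Dict.empty
      (by simp),
    List.drop_zero]
  have : (header.take 51).zip pvCols = header.zip pvCols := by
    rw [← pvCols_length]; exact zip_take header pvCols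
  rw [this]
  rfl
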